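-- pv_equiv track=rewrite | github.com/o-aguirre/Code-Signal-Exercises | 02.Edge_of_the_Ocean/05.py | solution
-- ===== SOURCE A (Python) =====
-- def solution(matrix):
--     sum = 0
--     column_pass = []
--     for row in matrix:
--         for e in range(len(row)):
--             if row[e] == 0:
--                 if e not in column_pass:
--                     column_pass.append(e)
--
--             else:
--                 if e not in column_pass:
--                     sum += row[e]
--
--     return sum
-- ===== SOURCE B (Python) =====
-- def solution(matrix):
--     total = 0
--     maxlen = max((len(row) for row in matrix), default=0)
--     for j in range(maxlen):
--         for row in matrix:
--             if j < len(row):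
--                 if row[j] == 0:
--                     break
--                 total += row[j]
--     return total
-- ===== Notes on version B (the rewrite author's own statement) =====
-- stated objective: faster
-- what changed: Column-major scan that breaks at the first zero of each column, replacing A's row-major pass that maintains a blocked-column list and does a linear membership scan of it per cell.
import Mathlib
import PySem

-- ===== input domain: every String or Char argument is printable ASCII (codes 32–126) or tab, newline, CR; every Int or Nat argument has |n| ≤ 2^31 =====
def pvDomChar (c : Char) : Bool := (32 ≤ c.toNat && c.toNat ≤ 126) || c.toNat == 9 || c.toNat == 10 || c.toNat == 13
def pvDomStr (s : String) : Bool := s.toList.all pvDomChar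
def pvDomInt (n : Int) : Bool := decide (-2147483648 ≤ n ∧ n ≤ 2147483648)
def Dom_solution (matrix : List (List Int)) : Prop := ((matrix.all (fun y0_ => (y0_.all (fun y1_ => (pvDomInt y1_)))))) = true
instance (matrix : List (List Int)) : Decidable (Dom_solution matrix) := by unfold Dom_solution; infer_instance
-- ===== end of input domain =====

-- B replaces A's row-major pass with a blocked-column list by a column-major scan
-- that breaks at the first zero of each column; same result, different traversal.


-- ===== PORT A =====
-- inner loop body: 'for e in range(len(row)): if row[e]==0: … else: …'
def stepA (row : List Int) (sp : Int × List Nat) (e : Nat) : Int × List Nat :=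
  if row.getD e 0 = 0 then
    (sp.1, if e ∈ sp.2 then sp.2 else sp.2 ++ [e])
  else
    if e ∈ sp.2 then sp else (sp.1 + row.getD e 0, sp.2)

def solution (matrix : List (List Int)) : Int :=
  (matrix.foldl (fun sp row => (List.range row.length).foldl (stepA row) sp) (0, [])).1

-- ===== PORT B =====
-- 'for row in matrix: if j < len(row): break on zero else total += row[j]' as recursion
def colScan (j : Nat) : List (List Int) → Int
  | [] => 0
  | r :: rs =>
    if j < r.length then
      (if r.getD j 0 = 0 then 0 else r.getD j 0 + colScan j rs)
    else colScan j rs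

def solution_alt (matrix : List (List Int)) : Int :=
  let maxlen := matrix.foldl (fun m row => max m row.length) 0
  (List.range maxlen).foldl (fun total j => total + colScan j matrix) 0

-- ===== PRECONDITION & SPEC =====
def Spec_solution (matrix : List (List Int)) (out : Int) : Prop := out = solution_alt matrix
instance (matrix : List (List Int)) (out : Int) : Decidable (Spec_solution matrix out) := by unfold Spec_solution; infer_instance

-- ===== CLAIM (what is proved, stated in full; the proofs are below) =====
def Claim_equal_solution : Prop := ∀ (matrix : List (List Int)), Dom_solution matrix → Spec_solution matrix (solution matrix)

-- ===== LEMMAS AND PROOFS =====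

lemma foldl_max_init (rs : List (List Int)) (a : Nat) :
    a ≤ rs.foldl (fun m row => max m row.length) a := by
  induction rs generalizing a with
  | nil => simp
  | cons r rs ih => exact le_trans (le_max_left a r.length) (ih _)

lemma foldl_max_mem (rs : List (List Int)) (a : Nat) (r : List Int) (h : r ∈ rs) :
    r.length ≤ rs.foldl (fun m row => max m row.length) a := by
  induction rs generalizing a with
  | nil => simp at h
  | cons q qs ih =>
    rcases List.mem_cons.1 h with h | h
    · subst h
      exact le_trans (le_max_right a r.length) (foldl_max_init qs _)
    · exact ih _ h

lemma foldl_add_range (n : Nat) (f : Nat → Int) (t : Int) :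
    (List.range n).foldl (fun total j => total + f j) t = t + ∑ j ∈ Finset.range n, f j := by
  induction n generalizing t with
  | zero => simp
  | succ n ih => simp [List.range_succ, List.foldl_append, ih, Finset.sum_range_succ]; ring

lemma innerA_spec (row : List Int) (n : Nat) (s : Int) (P : List Nat) :
    (List.range n).foldl (stepA row) (s, P) =
      (s + ∑ e ∈ Finset.range n,
          (if e ∉ P ∧ row.getD e 0 ≠ 0 then row.getD e 0 else 0),
       P ++ (List.range n).filter (fun e => decide (row.getD e 0 = 0) && decide (e ∉ P))) := by
  induction n with
  | zero => simp
  | succ n ih =>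
    rw [List.range_succ, List.foldl_append, ih]
    have hn : n ∉ (List.range n).filter (fun e => decide (row.getD e 0 = 0) && decide (e ∉ P)) := by
      intro h
      have := List.mem_range.1 (List.mem_of_mem_filter h)
      omega
    simp only [List.foldl_cons, List.foldl_nil, stepA, Finset.sum_range_succ,
      List.filter_append, List.filter_cons, List.filter_nil]
    by_cases h0 : row[n]?.getD 0 = 0
    · by_cases hP : n ∈ P
      · simp [List.getD, h0, hP]
      · simp [List.getD, h0, hP, List.append_assoc]
    · by_cases hP : n ∈ P
      · simp [List.getD, h0, hP]
      · simp [List.getD, h0, hP]; ring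

lemma outerA_spec (M : Nat) (rs : List (List Int)) :
    ∀ (s : Int) (P : List Nat), (∀ r ∈ rs, r.length ≤ M) →
    (rs.foldl (fun sp row => (List.range row.length).foldl (stepA row) sp) (s, P)).1
      = s + ∑ j ∈ Finset.range M, (if j ∈ P then 0 else colScan j rs) := by
  induction rs with
  | nil => intro s P _; simp [colScan]
  | cons r rs ih =>
    intro s P hlen
    have hr : r.length ≤ M := hlen r (List.mem_cons_self ..)
    rw [List.foldl_cons, innerA_spec, ih _ _ (fun q hq => hlen q (List.mem_cons_of_mem _ hq))]
    -- the per-row sum vanishes beyond r.length (getD defaults to 0), so extend it to range M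
    have hsub : Finset.range r.length ⊆ Finset.range M := by
      intro x hx; simp only [Finset.mem_range] at hx ⊢; omega
    have hext : ∑ e ∈ Finset.range r.length,
          (if e ∉ P ∧ r.getD e 0 ≠ 0 then r.getD e 0 else 0)
        = ∑ e ∈ Finset.range M,
          (if e ∉ P ∧ r.getD e 0 ≠ 0 then r.getD e 0 else 0) := by
      apply Finset.sum_subset hsub
      intro e _ he
      have hge : r.length ≤ e := le_of_not_gt (fun h => he (Finset.mem_range.2 h))
      simp [List.getD, List.getElem?_eq_none hge]
    rw [hext, add_assoc, ← Finset.sum_add_distrib]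
    congr 1
    apply Finset.sum_congr rfl
    intro j _
    by_cases hj : j ∈ P
    · simp [hj]
    · by_cases hjl : j < r.length
      · by_cases h0 : r[j] = 0
        · simp [hj, hjl, colScan, List.getD, h0]
        · simp [hj, hjl, colScan, List.getD, h0]
      · simp [hj, hjl, colScan, List.getD]

-- ===== VERDICT (by name: the statement is the Claim_ definition above) =====
theorem solution_spec : Claim_equal_solution := by
  intro matrix _
  unfold Spec_solution solution solution_alt
  rw [outerA_spec (matrix.foldl (fun m row => max m row.length) 0) matrix 0 []
        (fun r hr => foldl_max_mem matrix 0 r hr),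
      foldl_add_range]
  simp
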